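-- pv_equiv track=rewrite | github.com/sdivyanshu90/LangChain-DeepAgents-Playbook | deepagents/projects/project-3.5-codebase-explorer/src/codebase_explorer/workflow.py | summarize_inventory_modules
-- ===== SOURCE A (Python) =====
-- def summarize_inventory_modules(inventory: list[str]) -> list[str]:
--     grouped: dict[str, list[str]] = {}
--     for item in inventory:
--         module = item.split("/", 1)[0]
--         grouped.setdefault(module, []).append(item)
--
--     summaries = []
--     for module, files in sorted(grouped.items()):
--         preview = ", ".join(files[:5])
--         summaries.append(f"Module: {module}\nFiles: {preview}")
--     return summaries
-- ===== SOURCE B (Python) =====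
-- def _module_of(item: str) -> str:
--     return item.split("/", 1)[0]
--
--
-- def summarize_inventory_modules(inventory: list[str]) -> list[str]:
--     # Sort first (stable, by module prefix only), then emit one summary per
--     # consecutive run of equal module keys -- no intermediate dict.
--     ordered = sorted(inventory, key=_module_of)
--     summaries = []
--     i = 0
--     n = len(ordered)
--     while i < n:
--         module = _module_of(ordered[i])
--         j = i + 1
--         while j < n and _module_of(ordered[j]) == module:
--             j += 1
--         files = ordered[i:j]
--         summaries.append(f"Module: {module}\nFiles: {', '.join(files[:5])}")
--         i = j
--     return summaries
-- ===== Notes on version B (the rewrite author's own statement) =====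
-- stated objective: alternative
-- what changed: Replaces dict-grouping followed by sorting the (key, files) items with a stable sort of the inventory by module prefix followed by a single pass that emits one summary per consecutive run of equal keys.
import Mathlib
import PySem

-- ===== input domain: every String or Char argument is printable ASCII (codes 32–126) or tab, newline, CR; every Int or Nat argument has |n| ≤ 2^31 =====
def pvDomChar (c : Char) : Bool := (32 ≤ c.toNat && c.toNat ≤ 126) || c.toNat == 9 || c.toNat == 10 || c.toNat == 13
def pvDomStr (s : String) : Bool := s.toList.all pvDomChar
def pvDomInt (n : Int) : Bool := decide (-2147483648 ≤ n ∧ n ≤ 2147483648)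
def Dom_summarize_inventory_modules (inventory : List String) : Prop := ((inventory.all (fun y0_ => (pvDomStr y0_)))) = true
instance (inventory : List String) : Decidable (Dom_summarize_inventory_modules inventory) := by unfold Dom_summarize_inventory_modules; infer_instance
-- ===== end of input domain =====

-- B replaces A's dict-grouping-then-sort-of-items with a stable sort by module
-- prefix followed by one pass over consecutive runs of equal keys (objective: alternative).

-- ===== PORT A =====
-- item.split("/", 1)[0]; split with a nonempty separator always returns a
-- nonempty list, so the [0] index never raises (ported with default "").
def pvModuleOf (s : String) : String :=
  PySem.List.pyGetD ((PySem.Str.splitMax? s "/" 1).getD []) 0 ""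

-- f"Module: {module}\nFiles: {', '.join(files[:5])}"
def pvLine (m : String) (files : List String) : String :=
  "Module: " ++ m ++ "\nFiles: " ++ PySem.Str.join ", " (PySem.List.slice files none (some 5))

def summarize_inventory_modules (inventory : List String) : List String :=
  -- grouped.setdefault(module, []).append(item)  ==  grouped[module] = grouped.get(module, []) + [item]
  let grouped : PySem.Dict String (List String) :=
    inventory.foldl (fun d item => d.modify (pvModuleOf item) [] (fun fs => fs ++ [item])) PySem.Dict.empty
  -- sorted(grouped.items()): dict keys are distinct, so Python's tuple
  -- comparison on the items never reaches the second component — it is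
  -- exactly the sort by the first component.
  (PySem.List.sorted grouped.items (fun p => p.1) false).foldl
    (fun summaries p => summaries ++ [pvLine p.1 p.2]) []

-- ===== PORT B =====
-- the outer while loop of Source B: one summary per consecutive run of equal keys;
-- the inner while loop collecting the run is takeWhile/dropWhile
def pvGroupRuns : List String → List String
  | [] => []
  | x :: rest =>
    pvLine (pvModuleOf x) (x :: rest.takeWhile (fun y => pvModuleOf y == pvModuleOf x))
      :: pvGroupRuns (rest.dropWhile (fun y => pvModuleOf y == pvModuleOf x))
termination_by l => l.length
decreasing_by
  have := List.length_dropWhile_le (fun y => pvModuleOf y == pvModuleOf x) rest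
  simp only [List.length_cons]
  omega

def summarize_inventory_modules_alt (inventory : List String) : List String :=
  pvGroupRuns (PySem.List.sorted inventory pvModuleOf false)

-- ===== PRECONDITION & SPEC =====
def Spec_summarize_inventory_modules (inventory : List String) (out : List String) : Prop := out = summarize_inventory_modules_alt inventory
instance (inventory : List String) (out : List String) : Decidable (Spec_summarize_inventory_modules inventory out) := by unfold Spec_summarize_inventory_modules; infer_instance

-- ===== CLAIM (what is proved, stated in full; the proofs are below) =====
def Claim_equal_summarize_inventory_modules : Prop := ∀ (inventory : List String), Dom_summarize_inventory_modules inventory → Spec_summarize_inventory_modules inventory (summarize_inventory_modules inventory)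

-- ===== LEMMAS AND PROOFS =====

-- canonical form both ports are reduced to: the strictly sorted list of the
-- distinct module keys, each paired with the inventory files having that key
def pvCanon (inventory : List String) : List String :=
  (PySem.List.sorted (PySem.Set.ofList (inventory.map pvModuleOf)) (fun k => k) false).map
    (fun m => pvLine m (inventory.filter (fun x => pvModuleOf x == m)))

theorem pvA_eq_canon (inventory : List String) :
    summarize_inventory_modules inventory = pvCanon inventory := by
  simp only [summarize_inventory_modules]
  set grouped := inventory.foldl (fun d item => d.modify (pvModuleOf item) [] (fun fs => fs ++ [item]))
      (PySem.Dict.empty : PySem.Dict String (List String)) with hg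
  have hkeys : grouped.keys = PySem.Set.ofList (inventory.map pvModuleOf) := by
    rw [hg, PySem.Dict.keys_foldl_modify_key inventory pvModuleOf [] (fun _ x fs => fs ++ [x])]
    simp [PySem.Set.update, PySem.Set.ofList]
  have hnodup : grouped.keys.Nodup := by
    rw [hg]
    exact PySem.Dict.nodup_keys_foldl_modify_key inventory pvModuleOf [] (fun _ x fs => fs ++ [x]) _ (by simp)
  have hgetD : ∀ c, grouped.getD c [] = inventory.filter (fun x => pvModuleOf x == c) := by
    intro c
    rw [hg]
    rw [show inventory.foldl (fun d item => d.modify (pvModuleOf item) [] (fun fs => fs ++ [item]))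
        (PySem.Dict.empty : PySem.Dict String (List String))
      = (inventory.map (fun x => (pvModuleOf x, x))).foldl
        (fun d p => d.modify p.1 [] (fun fs => fs ++ [p.2])) PySem.Dict.empty from
      by rw [List.foldl_map]]
    rw [PySem.Dict.getD_foldl_modify_append]
    simp [List.filter_map, List.map_map, Function.comp_def]
  have hitems : grouped.items = grouped.keys.map (fun k => (k, grouped.getD k [])) :=
    PySem.Dict.items_eq_map_keys grouped hnodup []
  have hskeys_nodup : (PySem.List.sorted grouped.keys (fun k => k) false).Nodup :=
    (PySem.List.sorted_perm grouped.keys (fun k => k) false).nodup_iff.mpr hnodup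
  have hsorted : PySem.List.sorted grouped.items (fun p => p.1) false
      = (PySem.List.sorted grouped.keys (fun k => k) false).map (fun k => (k, grouped.getD k [])) := by
    apply PySem.List.sorted_eq_of_perm_of_pairwise_lt
    · rw [hitems]
      exact (PySem.List.sorted_perm grouped.keys (fun k => k) false).map _
    · apply List.pairwise_map.mpr
      exact ((PySem.List.sorted_pairwise grouped.keys (fun k => k)).and hskeys_nodup).imp
        (fun h => lt_of_le_of_ne h.1 h.2)
  rw [hsorted, PySem.List.foldl_append_singleton_eq_map, List.nil_append, List.map_map]
  unfold pvCanon
  rw [hkeys] at *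
  exact List.map_congr_left (fun k _ => by simp [Function.comp, hgetD k])

def pvRunMods : List String → List String
  | [] => []
  | x :: rest => pvModuleOf x :: pvRunMods (rest.dropWhile (fun y => pvModuleOf y == pvModuleOf x))
termination_by l => l.length
decreasing_by
  have := List.length_dropWhile_le (fun y => pvModuleOf y == pvModuleOf x) rest
  simp only [List.length_cons]
  omega

theorem pvGroupRuns_cons (x : String) (rest : List String) :
    pvGroupRuns (x :: rest)
      = pvLine (pvModuleOf x) (x :: rest.takeWhile (fun y => pvModuleOf y == pvModuleOf x))
        :: pvGroupRuns (rest.dropWhile (fun y => pvModuleOf y == pvModuleOf x)) := by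
  simp only [pvGroupRuns]

theorem pvRunMods_cons (x : String) (rest : List String) :
    pvRunMods (x :: rest)
      = pvModuleOf x :: pvRunMods (rest.dropWhile (fun y => pvModuleOf y == pvModuleOf x)) := by
  simp only [pvRunMods]

theorem pvGroupRuns_nil : pvGroupRuns [] = [] := by simp only [pvGroupRuns]

theorem pvRunMods_nil : pvRunMods [] = [] := by simp only [pvRunMods]

-- every emitted module name is the key of some element
theorem pvRunMods_mem_keys : ∀ (s : List String) (m : String),
    m ∈ pvRunMods s → m ∈ s.map pvModuleOf := by
  intro s
  induction s using pvRunMods.induct with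
  | case1 => simp [pvRunMods_nil]
  | case2 x rest ih =>
    intro m hm
    rw [pvRunMods_cons] at hm
    rcases List.mem_cons.mp hm with h | h
    · simp [h]
    · have := ih m h
      have hsub : ((rest.dropWhile (fun y => pvModuleOf y == pvModuleOf x)).map pvModuleOf).Sublist
          (rest.map pvModuleOf) := (List.dropWhile_sublist _).map _
      exact List.mem_cons_of_mem _ (hsub.mem this)

-- head of a dropWhile result fails the predicate
theorem pvDropWhile_head_false (p : String → Bool) :
    ∀ (l : List String) (x : String) (xs : List String),
      List.dropWhile p l = x :: xs → p x = false := by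
  intro l
  induction l with
  | nil => intro x xs h; simp at h
  | cons a l ih =>
    intro x xs h
    rw [List.dropWhile_cons] at h
    by_cases hp : p a = true
    · rw [if_pos hp] at h; exact ih x xs h
    · rw [if_neg hp] at h
      cases h
      simpa using hp

-- in a key-sorted run decomposition, everything after the first run has a strictly larger key
theorem pvDrop_keys_gt (x : String) (rest : List String)
    (h : (x :: rest).Pairwise (fun a b => pvModuleOf a ≤ pvModuleOf b)) :
    ∀ z ∈ rest.dropWhile (fun y => pvModuleOf y == pvModuleOf x), pvModuleOf x < pvModuleOf z := by
  intro z hz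
  rw [List.pairwise_cons] at h
  rcases hD : rest.dropWhile (fun y => pvModuleOf y == pvModuleOf x) with _ | ⟨hd0, tl⟩
  · rw [hD] at hz; exact absurd hz (List.not_mem_nil)
  · have hdsub : (hd0 :: tl).Sublist rest := hD ▸ List.dropWhile_sublist _
    have hhead : (pvModuleOf hd0 == pvModuleOf x) = false :=
      pvDropWhile_head_false _ rest hd0 tl hD
    have hne0 : pvModuleOf x ≠ pvModuleOf hd0 := fun he => by
      rw [he] at hhead; simp at hhead
    have hhd0 : pvModuleOf x < pvModuleOf hd0 :=
      lt_of_le_of_ne (h.1 hd0 (hdsub.mem List.mem_cons_self)) hne0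
    rw [hD] at hz
    rcases List.mem_cons.mp hz with rfl | hz'
    · exact hhd0
    · have hp : (hd0 :: tl).Pairwise (fun a b => pvModuleOf a ≤ pvModuleOf b) :=
        List.Pairwise.sublist hdsub h.2
      exact lt_of_lt_of_le hhd0 ((List.pairwise_cons.mp hp).1 z hz')

-- the first run is exactly the filter by the head's key
theorem pvFilter_run (x : String) (rest : List String)
    (h : (x :: rest).Pairwise (fun a b => pvModuleOf a ≤ pvModuleOf b)) :
    (x :: rest).filter (fun y => pvModuleOf y == pvModuleOf x)
      = x :: rest.takeWhile (fun y => pvModuleOf y == pvModuleOf x) := by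
  have hrest : rest.filter (fun y => pvModuleOf y == pvModuleOf x)
      = rest.takeWhile (fun y => pvModuleOf y == pvModuleOf x) := by
    conv_lhs => rw [← List.takeWhile_append_dropWhile
      (p := fun y => pvModuleOf y == pvModuleOf x) (l := rest)]
    rw [List.filter_append,
        List.filter_eq_self.mpr (fun z hz => by
          exact List.mem_takeWhile_imp (p := fun y => pvModuleOf y == pvModuleOf x) (l := rest) hz),
        List.filter_eq_nil_iff.mpr (fun z hz => by
          have := pvDrop_keys_gt x rest h z hz
          simp [ne_of_gt this]),
        List.append_nil]
  simp [hrest]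

-- keys of elements of the first run all equal the head's key
theorem pvTake_keys_eq (x : String) (rest : List String) (z : String)
    (hz : z ∈ rest.takeWhile (fun y => pvModuleOf y == pvModuleOf x)) :
    pvModuleOf z = pvModuleOf x := by
  have := List.mem_takeWhile_imp (p := fun y => pvModuleOf y == pvModuleOf x) (l := rest) hz
  simpa using this

theorem pvRunMods_pairwise (s : List String)
    (h : s.Pairwise (fun a b => pvModuleOf a ≤ pvModuleOf b)) :
    (pvRunMods s).Pairwise (· < ·) := by
  induction s using pvRunMods.induct with
  | case1 => simp [pvRunMods_nil]
  | case2 x rest ih =>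
    rw [pvRunMods_cons]
    refine List.pairwise_cons.mpr ⟨?_, ih (List.Pairwise.sublist (List.dropWhile_sublist _)
      (List.pairwise_cons.mp h).2)⟩
    intro m hm
    obtain ⟨z, hz, rfl⟩ := List.mem_map.mp (pvRunMods_mem_keys _ m hm)
    exact pvDrop_keys_gt x rest h z hz

theorem pvRunMods_mem (s : List String)
    (h : s.Pairwise (fun a b => pvModuleOf a ≤ pvModuleOf b)) (m : String) :
    m ∈ pvRunMods s ↔ m ∈ s.map pvModuleOf := by
  induction s using pvRunMods.induct with
  | case1 => simp [pvRunMods_nil]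
  | case2 x rest ih =>
    constructor
    · exact pvRunMods_mem_keys _ m
    · intro hm
      rw [pvRunMods_cons]
      rcases List.mem_cons.mp hm with rfl | hm'
      · exact List.mem_cons_self
      · by_cases hex : m = pvModuleOf x
        · exact hex ▸ List.mem_cons_self
        · obtain ⟨z, hz, rfl⟩ := List.mem_map.mp hm'
          rw [← List.takeWhile_append_dropWhile
            (p := fun y => pvModuleOf y == pvModuleOf x) (l := rest)] at hz
          rcases List.mem_append.mp hz with hz' | hz'
          · exact absurd (pvTake_keys_eq x rest z hz') hex
          · refine List.mem_cons_of_mem _ ?_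
            exact (ih (List.Pairwise.sublist (List.dropWhile_sublist _) (List.pairwise_cons.mp h).2)).mpr
              (List.mem_map_of_mem hz')

theorem pvGroupRuns_eq (s : List String)
    (h : s.Pairwise (fun a b => pvModuleOf a ≤ pvModuleOf b)) :
    pvGroupRuns s
      = (pvRunMods s).map (fun m => pvLine m (s.filter (fun x => pvModuleOf x == m))) := by
  induction s using pvRunMods.induct with
  | case1 => simp [pvGroupRuns_nil, pvRunMods_nil]
  | case2 x rest ih =>
    have hd_pair := List.Pairwise.sublist (List.dropWhile_sublist
      (fun y => pvModuleOf y == pvModuleOf x)) (List.pairwise_cons.mp h).2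
    rw [pvGroupRuns_cons x rest]
    rw [pvRunMods_cons x rest]
    rw [List.map_cons]
    rw [pvFilter_run x rest h]
    rw [ih hd_pair]
    refine congrArg (List.cons _) ?_
    apply List.map_congr_left
    intro m hm
    obtain ⟨z, hz, rfl⟩ := List.mem_map.mp (pvRunMods_mem_keys _ _ hm)
    have hgt := pvDrop_keys_gt x rest h z hz
    refine congrArg (pvLine (pvModuleOf z)) ?_
    conv_rhs => rw [← List.takeWhile_append_dropWhile
      (p := fun y => pvModuleOf y == pvModuleOf x) (l := rest)]
    rw [List.filter_cons, List.filter_append]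
    have h1 : (pvModuleOf x == pvModuleOf z) = false := by simp [ne_of_lt hgt]
    rw [h1]
    have htk : (rest.takeWhile (fun y => pvModuleOf y == pvModuleOf x)).filter
        (fun y => pvModuleOf y == pvModuleOf z) = [] :=
      List.filter_eq_nil_iff.mpr (fun w hw => by
        have hkey := pvTake_keys_eq x rest w hw
        simp [hkey]
        exact fun he => absurd (hkey ▸ he) (ne_of_lt hgt))
    rw [htk]
    simp

-- sorted-insert preserves key-sortedness
theorem pvInsert_pairwise (x : String) (acc : List String)
    (h : acc.Pairwise (fun a b => pvModuleOf a ≤ pvModuleOf b)) :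
    (PySem.List.insertBy (fun a b => decide (pvModuleOf a < pvModuleOf b)) x acc).Pairwise
      (fun a b => pvModuleOf a ≤ pvModuleOf b) := by
  induction acc with
  | nil => simp [PySem.List.insertBy]
  | cons y ys ih =>
    rw [List.pairwise_cons] at h
    simp only [PySem.List.insertBy]
    split_ifs with hlt
    · simp only [decide_eq_true_eq] at hlt
      refine List.pairwise_cons.mpr ⟨?_, List.pairwise_cons.mpr ⟨h.1, h.2⟩⟩
      intro z hz
      rcases List.mem_cons.mp hz with rfl | hz'
      · exact le_of_lt hlt
      · exact le_of_lt (lt_of_lt_of_le hlt (h.1 z hz'))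
    · simp only [decide_eq_true_eq, not_lt] at hlt
      refine List.pairwise_cons.mpr ⟨?_, ih h.2⟩
      intro z hz
      rcases (PySem.List.mem_insertBy _ x z ys).mp hz with rfl | hz'
      · exact hlt
      · exact h.1 z hz'

-- in a key-sorted accumulator, sorted-insert appends x at the end of its key class:
-- the filter by any key m gains x at the END exactly when x has key m
theorem pvInsert_filter (m x : String) (acc : List String)
    (h : acc.Pairwise (fun a b => pvModuleOf a ≤ pvModuleOf b)) :
    (PySem.List.insertBy (fun a b => decide (pvModuleOf a < pvModuleOf b)) x acc).filter
        (fun y => pvModuleOf y == m)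
      = acc.filter (fun y => pvModuleOf y == m)
        ++ (if pvModuleOf x == m then [x] else []) := by
  induction acc with
  | nil => simp [PySem.List.insertBy, List.filter_cons]
  | cons y ys ih =>
    rw [List.pairwise_cons] at h
    by_cases hlt : pvModuleOf x < pvModuleOf y
    · rw [show PySem.List.insertBy (fun a b => decide (pvModuleOf a < pvModuleOf b)) x (y :: ys)
          = x :: y :: ys from by simp [PySem.List.insertBy, hlt]]
      by_cases hx : pvModuleOf x = m
      · have hnil : (y :: ys).filter (fun z => pvModuleOf z == m) = [] :=
          List.filter_eq_nil_iff.mpr (fun z hz => by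
            have hyz : pvModuleOf y ≤ pvModuleOf z := by
              rcases List.mem_cons.mp hz with rfl | hz'
              · exact le_refl _
              · exact h.1 z hz'
            have hmz : m < pvModuleOf z := lt_of_lt_of_le (hx ▸ hlt) hyz
            simp [ne_of_gt hmz])
        simp [hx, hnil]
      · simp [List.filter_cons, hx]
    · rw [show PySem.List.insertBy (fun a b => decide (pvModuleOf a < pvModuleOf b)) x (y :: ys)
          = y :: PySem.List.insertBy (fun a b => decide (pvModuleOf a < pvModuleOf b)) x ys from by
        simp [PySem.List.insertBy, hlt]]
      rw [List.filter_cons, List.filter_cons, ih h.2]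
      by_cases hy : pvModuleOf y = m <;> simp [hy]

-- the insertion-sort fold is stable: filtering by one key value is unchanged
theorem pvSortFold_filter (m : String) :
    ∀ (xs acc : List String), acc.Pairwise (fun a b => pvModuleOf a ≤ pvModuleOf b) →
      ((xs.foldl (fun a x =>
          PySem.List.insertBy (fun a b => decide (pvModuleOf a < pvModuleOf b)) x a) acc).filter
        (fun y => pvModuleOf y == m))
        = acc.filter (fun y => pvModuleOf y == m) ++ xs.filter (fun y => pvModuleOf y == m) := by
  intro xs
  induction xs with
  | nil => intro acc _; simp
  | cons x xs ih =>
    intro acc hacc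
    rw [List.foldl_cons, ih _ (pvInsert_pairwise x acc hacc), pvInsert_filter m x acc hacc,
      List.filter_cons]
    by_cases hx : pvModuleOf x = m <;> simp [hx]

theorem pvSorted_filter (inventory : List String) (m : String) :
    (PySem.List.sorted inventory pvModuleOf false).filter (fun y => pvModuleOf y == m)
      = inventory.filter (fun y => pvModuleOf y == m) := by
  rw [PySem.List.sorted_eq_foldl_insertBy]
  simpa using pvSortFold_filter m inventory [] List.Pairwise.nil

theorem pvB_eq_canon (inventory : List String) :
    pvGroupRuns (PySem.List.sorted inventory pvModuleOf false)
      = (PySem.List.sorted (PySem.Set.ofList (inventory.map pvModuleOf)) (fun k => k) false).map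
          (fun m => pvLine m (inventory.filter (fun x => pvModuleOf x == m))) := by
  have hpair := PySem.List.sorted_pairwise inventory pvModuleOf
  have hperm := PySem.List.sorted_perm inventory pvModuleOf false
  have hmods : PySem.List.sorted (PySem.Set.ofList (inventory.map pvModuleOf)) (fun k => k) false
      = pvRunMods (PySem.List.sorted inventory pvModuleOf false) := by
    apply PySem.List.sorted_eq_of_perm_of_pairwise_lt
    · refine (List.perm_ext_iff_of_nodup
        ((pvRunMods_pairwise _ hpair).imp ne_of_lt) (PySem.Set.nodup_ofList _)).mpr ?_
      intro a
      rw [pvRunMods_mem _ hpair, PySem.Set.mem_ofList, (hperm.map pvModuleOf).mem_iff]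
    · exact pvRunMods_pairwise _ hpair
  rw [pvGroupRuns_eq _ hpair, hmods]
  exact List.map_congr_left (fun m _ => by rw [pvSorted_filter])

theorem pvAlt_eq_canon (inventory : List String) :
    summarize_inventory_modules_alt inventory = pvCanon inventory := by
  simp only [summarize_inventory_modules_alt, pvCanon]
  exact pvB_eq_canon inventory

-- ===== VERDICT (by name: the statement is the Claim_ definition above) =====
theorem summarize_inventory_modules_spec : Claim_equal_summarize_inventory_modules := by
  intro inventory _
  unfold Spec_summarize_inventory_modules
  rw [pvA_eq_canon, pvAlt_eq_canon]
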